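-- pv_equiv track=rewrite | github.com/Wheeler-Lab/kaks | src/kaks/kaks.py | _nr_different_kmers
-- ===== SOURCE A (Python) =====
-- def _nr_different_kmers(a: str, b: str, k: int=3):
--     # Count the number of different kmers between strings a and b
--     if len(a) != len(b):
--         raise ValueError("Strings need to be of same length")
--     differences = 0
--     for i in range(0, len(a), k):
--         if a[i:i+k] != b[i:i+k]:
--             differences += 1
--     return differences
-- ===== SOURCE B (Python) =====
-- def _nr_different_kmers(a: str, b: str, k: int=3):
--     # Count the number of different kmers between strings a and b
--     if len(a) != len(b):
--         raise ValueError("Strings need to be of same length")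
--     blocks = set()
--     for i, (x, y) in enumerate(zip(a, b)):
--         if x != y:
--             blocks.add(i // k)
--     return len(blocks)
-- ===== Notes on version B (the rewrite author's own statement) =====
-- stated objective: alternative
-- what changed: B scans character positions once and collects the set of block indices i//k that contain a mismatch, returning the set's size, instead of A's loop over block starts that builds and compares two k-length slices per block.
-- outside the precondition, e.g. on _nr_different_kmers('ab', 'cd', -1): A returns 0, B returns 2
import Mathlib
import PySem

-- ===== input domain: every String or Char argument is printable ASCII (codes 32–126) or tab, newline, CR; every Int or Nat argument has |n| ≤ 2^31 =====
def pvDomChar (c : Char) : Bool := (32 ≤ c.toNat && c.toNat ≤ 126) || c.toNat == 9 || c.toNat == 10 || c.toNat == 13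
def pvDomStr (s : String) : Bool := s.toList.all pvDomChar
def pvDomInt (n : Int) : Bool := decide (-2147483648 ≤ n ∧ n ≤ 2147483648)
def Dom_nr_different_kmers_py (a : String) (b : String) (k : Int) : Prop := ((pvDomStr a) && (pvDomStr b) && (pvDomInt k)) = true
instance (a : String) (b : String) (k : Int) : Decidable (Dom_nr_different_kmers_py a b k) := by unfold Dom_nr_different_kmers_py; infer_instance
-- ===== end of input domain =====

-- B counts mismatching k-blocks by a single per-character scan collecting the set of block
-- indices i//k with a mismatch, instead of A's slice-and-compare loop over block starts
-- (alternative decomposition, same asymptotic cost).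


-- ===== PORT A =====
def nr_different_kmers_py (a : String) (b : String) (k : Int) : Int :=
  if PySem.Str.len a ≠ PySem.Str.len b then 0  -- Python raises ValueError here; outside Pre_
  else
    (PySem.List.pyRange 0 (PySem.Str.len a) k).foldl
      (fun differences i =>
        if PySem.List.slice a.toList (some i) (some (i + k)) ≠
           PySem.List.slice b.toList (some i) (some (i + k))
        then differences + 1 else differences) 0

-- ===== PORT B =====
def nr_different_kmers_py_alt (a : String) (b : String) (k : Int) : Int :=
  if PySem.Str.len a ≠ PySem.Str.len b then 0  -- Python raises ValueError here; outside Pre_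
  else
    PySem.Set.len
      ((PySem.List.enumerate (a.toList.zip b.toList) 0).foldl
        (fun blocks p =>
          if p.2.1 ≠ p.2.2 then PySem.Set.add blocks (PySem.Int.floordiv p.1 k) else blocks)
        PySem.Set.empty)

-- ===== PRECONDITION & SPEC =====
-- Pre_ excludes unequal lengths (A raises ValueError) and k = 0 (A raises ValueError from
-- range(0, n, 0)); it also excludes negative k, outside the natural domain of a k-mer size,
-- where A returns 0 via an empty range while B's i//k floor-division counts blocks.
def Pre_nr_different_kmers_py (a : String) (b : String) (k : Int) : Prop :=
  PySem.Str.len a = PySem.Str.len b ∧ 0 < k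
instance (a : String) (b : String) (k : Int) : Decidable (Pre_nr_different_kmers_py a b k) := by unfold Pre_nr_different_kmers_py; infer_instance

def pvWitness_nr_different_kmers_py : String × String × Int := ("abcdef", "abdcef", 2)

def Spec_nr_different_kmers_py (a : String) (b : String) (k : Int) (out : Int) : Prop := out = nr_different_kmers_py_alt a b k
instance (a : String) (b : String) (k : Int) (out : Int) : Decidable (Spec_nr_different_kmers_py a b k out) := by unfold Spec_nr_different_kmers_py; infer_instance

-- ===== CLAIM (what is proved, stated in full; the proofs are below) =====
def Claim_equal_nr_different_kmers_py : Prop := ∀ (a : String) (b : String) (k : Int), Dom_nr_different_kmers_py a b k → Pre_nr_different_kmers_py a b k → Spec_nr_different_kmers_py a b k (nr_different_kmers_py a b k)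

-- ===== LEMMAS AND PROOFS =====

-- the common block count: number of k-chunks on which the two lists differ
def pvCount (la lb : List Char) (k : Nat) : Nat :=
  if _h : la = [] ∨ k = 0 then 0
  else (if la.take k ≠ lb.take k then 1 else 0) + pvCount (la.drop k) (lb.drop k) k
termination_by la.length
decreasing_by
  push Not at _h
  cases la with
  | nil => exact absurd rfl _h.1
  | cons x xs => simp [List.length_drop]; omega

theorem pvRange_nil (a b k : Int) (hk : 0 < k) (h : b ≤ a) :
    PySem.List.pyRange a b k = [] := by
  rw [PySem.List.pyRange_of_pos a b hk]
  simp [show ¬ a < b by omega]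

theorem pvRange_cons (a b k : Int) (hk : 0 < k) (h : a < b) :
    PySem.List.pyRange a b k = a :: PySem.List.pyRange (a + k) b k := by
  rw [PySem.List.pyRange_of_pos a b hk, PySem.List.pyRange_of_pos (a+k) b hk]
  rw [if_pos h]
  have key : ((b - a + k - 1) / k).toNat = (if a + k < b then ((b - (a+k) + k - 1) / k).toNat else 0) + 1 := by
    by_cases h2 : a + k < b
    · rw [if_pos h2]
      have e : b - a + k - 1 = (b - (a+k) + k - 1) + 1 * k := by ring
      rw [e, Int.add_mul_ediv_right _ _ (by omega : k ≠ 0)]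
      have h3 : 0 ≤ (b - (a+k) + k - 1) / k := Int.ediv_nonneg (by omega) (by omega)
      omega
    · rw [if_neg h2]
      have e1 : b - a + k - 1 = PySem.Int.floordiv (b - a + k - 1) k * k + PySem.Int.mod (b - a + k - 1) k := (PySem.Int.floordiv_mul_add_mod _ _).symm
      have : PySem.Int.floordiv (b - a + k - 1) k = 1 := by
        rw [PySem.Int.floordiv_eq_iff_of_pos hk]; omega
      rw [show (b - a + k - 1) / k = PySem.Int.floordiv (b - a + k - 1) k from (PySem.Int.floordiv_eq_ediv_of_pos hk).symm, this]
      rfl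
  rw [key, List.range_succ_eq_map, List.map_cons]
  simp only [Nat.cast_zero, mul_zero, add_zero, List.map_map]
  congr 1
  apply List.map_congr_left
  intro x _
  simp [Nat.succ_eq_add_one]
  ring

-- unequal equal-length lists have a mismatching zipped pair
theorem pvNe_zip (l1 l2 : List Char) (h : l1.length = l2.length) :
    l1 ≠ l2 ↔ ∃ p ∈ l1.zip l2, p.1 ≠ p.2 := by
  induction l1 generalizing l2 with
  | nil => cases l2 with
    | nil => simp
    | cons y ys => simp at h
  | cons x xs ih =>
    cases l2 with
    | nil => simp at h
    | cons y ys =>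
      simp only [List.length_cons, Nat.add_right_cancel_iff] at h
      by_cases hxy : x = y
      · subst hxy
        simp only [List.zip_cons_cons, List.mem_cons, ne_eq, List.cons.injEq, true_and]
        rw [show (¬ xs = ys) = (xs ≠ ys) from rfl, ih ys h]
        constructor
        · rintro ⟨p, hp, hne⟩; exact ⟨p, Or.inr hp, hne⟩
        · rintro ⟨p, hp, hne⟩
          rcases hp with h1 | h2
          · subst h1; simp at hne
          · exact ⟨p, h2, hne⟩
      · constructor
        · intro _; exact ⟨(x, y), by simp, hxy⟩
        · intro _; simp [hxy]

-- one chunk of B's loop: every index maps to block m, so the fold adds m iff some pair differs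
theorem pvB_chunk (k m : Int) :
    ∀ (z : List (Char × Char)) (o : Int) (S : PySem.Set Int),
      (∀ j : Nat, j < z.length → PySem.Int.floordiv (o + j) k = m) →
      (PySem.List.enumerate z o).foldl
        (fun blocks p =>
          if p.2.1 ≠ p.2.2 then PySem.Set.add blocks (PySem.Int.floordiv p.1 k) else blocks) S
      = if ∃ p ∈ z, p.1 ≠ p.2 then PySem.Set.add S m else S := by
  intro z
  induction z with
  | nil => intro o S _; simp [PySem.List.enumerate_nil]
  | cons p z ih =>
    intro o S hidx
    rw [PySem.List.enumerate_cons, List.foldl_cons]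
    have h0 : PySem.Int.floordiv o k = m := by
      have := hidx 0 (by simp)
      simpa using this
    have hrest : ∀ j : Nat, j < z.length → PySem.Int.floordiv (o + 1 + j) k = m := by
      intro j hj
      have := hidx (j+1) (by simp; omega)
      rw [← this]; congr 1; push_cast; ring
    by_cases hp : p.1 ≠ p.2
    · rw [if_pos hp, h0, ih (o+1) (PySem.Set.add S m) hrest]
      by_cases hz : ∃ q ∈ z, q.1 ≠ q.2
      · rw [if_pos hz, if_pos ⟨p, by simp, hp⟩]
        exact PySem.Set.add_of_mem (by simp [PySem.Set.mem_add])
      · rw [if_neg hz, if_pos ⟨p, by simp, hp⟩]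
    · rw [if_neg hp, ih (o+1) S hrest]
      simp only [not_not] at hp
      by_cases hz : ∃ q ∈ z, q.1 ≠ q.2
      · rw [if_pos hz, if_pos (by rcases hz with ⟨q, hq, hne⟩; exact ⟨q, by simp [hq], hne⟩)]
      · rw [if_neg hz, if_neg ?_]
        rintro ⟨q, hq, hne⟩
        rcases List.mem_cons.1 hq with h1 | h2
        · subst h1; exact hne hp
        · exact hz ⟨q, h2, hne⟩

-- B's whole loop: the set grows by exactly the number of differing chunks
theorem pvB_aux (k : Int) (hk : 0 < k) :
    ∀ (N : Nat) (la lb : List Char) (m : Nat) (S : PySem.Set Int),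
      la.length = lb.length → la.length ≤ N → (∀ x ∈ S, x < (m : Int)) →
      ((PySem.List.enumerate (la.zip lb) ((m : Int) * k)).foldl
        (fun blocks p =>
          if p.2.1 ≠ p.2.2 then PySem.Set.add blocks (PySem.Int.floordiv p.1 k) else blocks)
        S).length
      = S.length + pvCount la lb k.toNat := by
  intro N
  induction N with
  | zero =>
    intro la lb m S hlen hN _
    have : la = [] := List.length_eq_zero_iff.1 (by omega)
    subst this
    have : lb = [] := List.length_eq_zero_iff.1 (by simp at hlen; omega)
    subst this
    simp [PySem.List.enumerate_nil, pvCount]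
  | succ N ih =>
    intro la lb m S hlen hN hS
    by_cases hnil : la = []
    · subst hnil
      have : lb = [] := List.length_eq_zero_iff.1 (by simp at hlen; omega)
      subst this
      simp [PySem.List.enumerate_nil, pvCount]
    · obtain ⟨t, ht⟩ : ∃ t, t = k.toNat := ⟨_, rfl⟩
      have hkt : 0 < t := by omega
      rw [show k.toNat = t from ht.symm] at ih ⊢
      have hzip : la.zip lb = (la.take t).zip (lb.take t) ++ (la.drop t).zip (lb.drop t) := by
        rw [← List.zip_append (by simp [hlen])]
        simp
      rw [hzip, PySem.List.enumerate_append, List.foldl_append]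
      -- the chunk
      have hlen1 : ((la.take t).zip (lb.take t)).length = min t la.length := by
        simp [hlen]
      have hidx : ∀ j : Nat, j < ((la.take t).zip (lb.take t)).length →
          PySem.Int.floordiv ((m : Int) * k + (j : Int)) k = (m : Int) := by
        intro j hj
        rw [hlen1] at hj
        have hj2 : (j : Int) < k := by omega
        rw [PySem.Int.floordiv_eq_iff_of_pos hk]
        constructor
        · omega
        · nlinarith [Int.natCast_nonneg j]
      rw [pvB_chunk k (m : Int) _ _ S hidx]
      have hmS : ((m : Int)) ∉ S := fun h => absurd (hS _ h) (by omega)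
      have hchunkeq : (la.take t ≠ lb.take t) ↔ ∃ p ∈ (la.take t).zip (lb.take t), p.1 ≠ p.2 :=
        pvNe_zip _ _ (by simp [hlen])
      have hcount : pvCount la lb t = (if la.take t ≠ lb.take t then 1 else 0) + pvCount (la.drop t) (lb.drop t) t := by
        rw [pvCount]
        rw [dif_neg (by push Not; exact ⟨hnil, by omega⟩)]
      by_cases hbig : la.length ≤ t
      · -- last chunk
        have hd1 : la.drop t = [] := by simp [hbig]
        have hd2 : lb.drop t = [] := by simp; omega
        rw [hd1, hd2]
        simp only [List.zip_nil_left, PySem.List.enumerate_nil, List.foldl_nil]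
        rw [hcount, hd1, hd2]
        have hc0 : pvCount [] [] t = 0 := by rw [pvCount]; simp
        rw [hc0]
        by_cases hc : ∃ p ∈ (la.take t).zip (lb.take t), p.1 ≠ p.2
        · rw [if_pos hc, PySem.Set.add_of_not_mem hmS, if_pos (hchunkeq.2 hc)]
          simp
        · rw [if_neg hc, if_neg (fun h => hc (hchunkeq.1 h))]
          simp
      · -- general chunk: recurse
        push Not at hbig
        have hofs : (m : Int) * k + (((la.take t).zip (lb.take t)).length : Int) = ((m + 1 : Nat) : Int) * k := by
          rw [hlen1]
          have : min t la.length = t := by omega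
          rw [this]
          push_cast
          have : ((t : Int)) = k := by omega
          rw [this]; ring
        rw [hofs]
        have hSnew : ∀ x ∈ (if ∃ p ∈ (la.take t).zip (lb.take t), p.1 ≠ p.2 then PySem.Set.add S (m : Int) else S), x < ((m + 1 : Nat) : Int) := by
          intro x hx
          by_cases hc : ∃ p ∈ (la.take t).zip (lb.take t), p.1 ≠ p.2
          · rw [if_pos hc] at hx
            rcases (PySem.Set.mem_add _ _ _).1 hx with h1 | h2
            · have := hS _ h1; push_cast; omega
            · subst h2; push_cast; omega
          · rw [if_neg hc] at hx
            have := hS _ hx; push_cast; omega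
        have hrec := ih (la.drop t) (lb.drop t) (m + 1)
          (if ∃ p ∈ (la.take t).zip (lb.take t), p.1 ≠ p.2 then PySem.Set.add S (m : Int) else S)
          (by simp [hlen]) (by simp [List.length_drop]; omega) hSnew
        rw [hrec, hcount]
        by_cases hc : ∃ p ∈ (la.take t).zip (lb.take t), p.1 ≠ p.2
        · rw [if_pos hc, if_pos (hchunkeq.2 hc), PySem.Set.add_of_not_mem hmS]
          simp; omega
        · rw [if_neg hc, if_neg (fun h => hc (hchunkeq.1 h))]
          omega

-- A's loop: counting differing slices over the block starts is pvCount
theorem pvA_aux (k : Nat) (hk : 0 < k) :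
    ∀ (N : Nat) (la0 lb0 la lb : List Char) (j : Nat),
      la = la0.drop j → lb = lb0.drop j → la.length ≤ N →
      (PySem.List.pyRange (j : Int) ((j : Int) + (la.length : Int)) (k : Int)).countP
        (fun i => decide (PySem.List.slice la0 (some i) (some (i + (k : Int))) ≠
                          PySem.List.slice lb0 (some i) (some (i + (k : Int)))))
      = pvCount la lb k := by
  intro N
  induction N with
  | zero =>
    intro la0 lb0 la lb j ha hb hN
    have hla : la = [] := List.length_eq_zero_iff.1 (by omega)
    subst hla
    rw [pvRange_nil _ _ _ (by positivity) (by simp)]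
    rw [pvCount]
    simp
  | succ N ih =>
    intro la0 lb0 la lb j ha hb hN
    by_cases hnil : la = []
    · subst hnil
      rw [pvRange_nil _ _ _ (by positivity) (by simp)]
      rw [pvCount]
      simp
    · have hpos : 0 < la.length := List.length_pos_iff.2 hnil
      rw [pvRange_cons _ _ _ (by positivity) (by omega), List.countP_cons]
      have hsl : PySem.List.slice la0 (some (j : Int)) (some ((j : Int) + (k : Int))) = la.take k := by
        rw [PySem.List.slice_natCast_add la0 j k, ha]
      have hsl2 : PySem.List.slice lb0 (some (j : Int)) (some ((j : Int) + (k : Int))) = lb.take k := by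
        rw [PySem.List.slice_natCast_add lb0 j k, hb]
      have hrest : (PySem.List.pyRange ((j : Int) + (k : Int)) ((j : Int) + (la.length : Int)) (k : Int)).countP
          (fun i => decide (PySem.List.slice la0 (some i) (some (i + (k : Int))) ≠
                            PySem.List.slice lb0 (some i) (some (i + (k : Int)))))
          = pvCount (la.drop k) (lb.drop k) k := by
        by_cases hbig : la.length ≤ k
        · rw [pvRange_nil _ _ _ (by positivity) (by omega)]
          have : la.drop k = [] := by simp [hbig]
          rw [this, pvCount]
          simp
        · have e1 : ((j : Int) + (k : Int)) = ((j + k : Nat) : Int) := by push_cast; ring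
          have e2 : ((j : Int) + (la.length : Int)) = ((j + k : Nat) : Int) + (((la.drop k).length : Nat) : Int) := by
            simp [List.length_drop]; omega
          rw [e1, e2]
          exact ih la0 lb0 (la.drop k) (lb.drop k) (j + k)
            (by rw [ha, List.drop_drop])
            (by rw [hb, List.drop_drop])
            (by simp [List.length_drop]; omega)
      rw [hrest, hsl, hsl2]
      have hstep : pvCount la lb k = (if la.take k ≠ lb.take k then 1 else 0) + pvCount (la.drop k) (lb.drop k) k := by
        rw [pvCount]
        rw [dif_neg (by push Not; exact ⟨hnil, by omega⟩)]
      rw [hstep]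
      by_cases hc : la.take k ≠ lb.take k
      · simp [hc]; omega
      · simp only [ne_eq, not_not] at hc
        simp [hc]

-- ===== VERDICT (by name: the statement is the Claim_ definition above) =====
theorem nr_different_kmers_py_spec : Claim_equal_nr_different_kmers_py := by
  intro a b k _ hpre
  obtain ⟨hlen, hk⟩ := hpre
  have hlen' : a.toList.length = b.toList.length := by
    simp only [PySem.Str.len_eq] at hlen; exact_mod_cast hlen
  unfold Spec_nr_different_kmers_py nr_different_kmers_py nr_different_kmers_py_alt
  rw [if_neg (not_not_intro hlen), if_neg (not_not_intro hlen)]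
  -- A side: turn the counting fold into a countP, then into pvCount
  have hbody : (fun (d : Int) (i : Int) =>
      if PySem.List.slice a.toList (some i) (some (i + k)) ≠
         PySem.List.slice b.toList (some i) (some (i + k))
      then d + 1 else d)
    = (fun (d : Int) (i : Int) =>
        if (fun i => decide (PySem.List.slice a.toList (some i) (some (i + k)) ≠
                             PySem.List.slice b.toList (some i) (some (i + k)))) i = true
        then d + 1 else d) := by
    funext d i; simp
  rw [hbody, PySem.List.foldl_count_if]
  have hkcast : ((k.toNat : Nat) : Int) = k := by omega
  have hA : (PySem.List.pyRange 0 (PySem.Str.len a) k).countP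
      (fun i => decide (PySem.List.slice a.toList (some i) (some (i + k)) ≠
                        PySem.List.slice b.toList (some i) (some (i + k))))
      = pvCount a.toList b.toList k.toNat := by
    rw [show PySem.Str.len a = ((0 : Nat) : Int) + (a.toList.length : Int) by
          simp [PySem.Str.len_eq],
        show (0 : Int) = ((0 : Nat) : Int) by simp, ← hkcast]
    exact pvA_aux k.toNat (by omega) a.toList.length a.toList b.toList a.toList b.toList 0
      (by simp) (by simp) le_rfl
  rw [hA]
  -- B side
  have hB := pvB_aux k hk a.toList.length a.toList b.toList 0 PySem.Set.empty
    hlen' le_rfl (by intro x hx; simp [PySem.Set.empty] at hx)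
  rw [show ((0 : Nat) : Int) * k = 0 by simp] at hB
  rw [PySem.Set.len, hB]
  simp [PySem.Set.empty]
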